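-- pv_equiv track=rewrite | github.com/AndreaVaiuso/ParkingOccupancyPredictor | utilities.py | getFName
-- ===== SOURCE A (Python) =====
-- def getFName(name):
--     n = name.split(".")
--     text = ""
--     i = 0
--     for i in range(len(n)):
--         if i == len(n)-2:
--             text += n[i]
--             return text
--         else:
--             text += n[i] + "."
-- ===== SOURCE B (Python) =====
-- def getFName(name):
--     i = name.rfind(".")
--     if i == -1:
--         return None
--     return name[:i]
-- ===== Notes on version B (the rewrite author's own statement) =====
-- stated objective: simpler
-- what changed: Replaces the split-into-parts list and the accumulating rejoin loop with a single rfind of the last dot and one slice.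
-- outside the precondition, e.g. on getFName('abc'): A returns None, B returns None
import Mathlib
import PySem

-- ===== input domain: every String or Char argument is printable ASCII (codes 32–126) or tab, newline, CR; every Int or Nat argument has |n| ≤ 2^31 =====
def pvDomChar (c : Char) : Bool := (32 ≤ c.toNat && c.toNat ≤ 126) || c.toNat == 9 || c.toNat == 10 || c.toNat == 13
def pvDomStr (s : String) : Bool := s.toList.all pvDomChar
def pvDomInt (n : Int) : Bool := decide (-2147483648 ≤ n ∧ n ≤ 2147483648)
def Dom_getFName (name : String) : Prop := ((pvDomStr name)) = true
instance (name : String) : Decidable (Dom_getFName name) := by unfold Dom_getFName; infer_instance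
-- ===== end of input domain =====

-- B replaces A's split-into-parts list and accumulating rejoin loop by one rfind of the
-- last dot and one slice (objective: simpler).

-- ===== PORT A =====
-- A's for-loop over range(len(n)) with its early return; the "" in the fall-off branch
-- stands for Python's None (unreachable under Pre_getFName)
def pvGoA (n : List String) (i : Nat) (text : String) : String :=
  if _h : i < n.length then
    if (i : Int) = (n.length : Int) - 2 then text ++ n.getD i ""
    else pvGoA n (i + 1) (text ++ n.getD i "" ++ ".")
  else ""
termination_by n.length - i

def getFName (name : String) : String :=
  pvGoA ((PySem.Str.split? name ".").getD []) 0 ""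

-- ===== PORT B =====
def getFName_alt (name : String) : String :=
  let i := PySem.Str.rfind name "."
  if i == -1 then "" else PySem.Str.slice name none (some i)

-- ===== PRECONDITION & SPEC =====
-- Pre_ excludes names without a dot: there Python A falls off its loop and returns None
-- (no value of the declared String type); B likewise returns None there.
def Pre_getFName (name : String) : Prop := PySem.Str.isIn "." name = true
instance (name : String) : Decidable (Pre_getFName name) := by unfold Pre_getFName; infer_instance

def pvWitness_getFName : String := "archive.tar.gz"

def Spec_getFName (name : String) (out : String) : Prop := out = getFName_alt name
instance (name : String) (out : String) : Decidable (Spec_getFName name out) := by unfold Spec_getFName; infer_instance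

-- ===== CLAIM (what is proved, stated in full; the proofs are below) =====
def Claim_equal_getFName : Prop := ∀ (name : String), Dom_getFName name → Pre_getFName name → Spec_getFName name (getFName name)

-- ===== LEMMAS AND PROOFS =====

-- reference split on '.' (what A's splitOn computes), with the accumulated current part
def pvSplit (pre : List Char) : List Char → List (List Char)
  | [] => [pre]
  | c :: r => if c = '.' then pre :: pvSplit [] r else pvSplit (pre ++ [c]) r

-- the characters before the LAST dot
def pvBL : List Char → List Char
  | [] => []
  | c :: r => if '.' ∈ r then c :: pvBL r else []

-- '.'-join on char lists / on strings (what A's loop accumulates)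
def pvJoinD : List (List Char) → List Char
  | [] => []
  | [x] => x
  | x :: y :: ys => x ++ '.' :: pvJoinD (y :: ys)

def pvJoinS : List String → String
  | [] => ""
  | [x] => x
  | x :: y :: ys => x ++ "." ++ pvJoinS (y :: ys)

lemma pvSplit_cons_dot (pre r) : pvSplit pre ('.' :: r) = pre :: pvSplit [] r := by
  simp [pvSplit]

lemma pvSplit_cons_ne (pre c r) (hc : ¬ c = '.') :
    pvSplit pre (c :: r) = pvSplit (pre ++ [c]) r := by
  simp [pvSplit, hc]

lemma pvSplit_ne_nil (pre cs) : pvSplit pre cs ≠ [] := by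
  induction cs generalizing pre with
  | nil => simp [pvSplit]
  | cons c r ih => by_cases h : c = '.' <;> simp [pvSplit, h, ih]

lemma pvSplit_no_dot (pre cs) (h : '.' ∉ cs) : pvSplit pre cs = [pre ++ cs] := by
  induction cs generalizing pre with
  | nil => simp [pvSplit]
  | cons c r ih =>
    simp only [List.mem_cons, not_or] at h
    rw [pvSplit_cons_ne pre c r (fun hc => h.1 hc.symm), ih _ h.2]
    simp

lemma pvSplit_len2 (pre cs) (h : '.' ∈ cs) : 2 ≤ (pvSplit pre cs).length := by
  induction cs generalizing pre with
  | nil => simp at h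
  | cons c r ih =>
    by_cases hc : c = '.'
    · subst hc
      obtain ⟨a, as, hx⟩ := List.exists_cons_of_ne_nil (pvSplit_ne_nil [] r)
      rw [pvSplit_cons_dot, hx]
      simp
    · have hr : '.' ∈ r := by
        cases List.mem_cons.mp h with
        | inl h1 => exact absurd h1.symm hc
        | inr h1 => exact h1
      rw [pvSplit_cons_ne pre c r hc]
      exact ih (pre ++ [c]) hr

lemma pvJoinD_cons (x : List Char) (xs : List (List Char)) (h : xs ≠ []) :
    pvJoinD (x :: xs) = x ++ '.' :: pvJoinD xs := by
  cases xs with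
  | nil => exact absurd rfl h
  | cons y ys => rfl

-- A's accumulated text = '.'-join of the parts before the last one
lemma pvM (cs : List Char) : ∀ pre, '.' ∈ cs →
    pvJoinD ((pvSplit pre cs).dropLast) = pre ++ pvBL cs := by
  induction cs with
  | nil => intro pre h; simp at h
  | cons c r ih =>
    intro pre h
    by_cases hc : c = '.'
    · subst hc
      by_cases hr : '.' ∈ r
      · have h2 := pvSplit_len2 [] r hr
        have hnil : (pvSplit [] r).dropLast ≠ [] := by
          intro hx
          have h3 : (pvSplit [] r).dropLast.length = (pvSplit [] r).length - 1 :=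
            List.length_dropLast
          rw [hx] at h3
          simp at h3
          omega
        rw [pvSplit_cons_dot,
            List.dropLast_cons_of_ne_nil (pvSplit_ne_nil [] r),
            pvJoinD_cons _ _ hnil, ih [] hr]
        simp [pvBL, hr]
      · rw [pvSplit_cons_dot, pvSplit_no_dot [] r hr]
        simp [pvJoinD, pvBL, hr]
    · have hr : '.' ∈ r := by
        cases List.mem_cons.mp h with
        | inl h1 => exact absurd h1.symm hc
        | inr h1 => exact h1
      rw [pvSplit_cons_ne pre c r hc, ih (pre ++ [c]) hr]
      simp [pvBL, hr]

-- the fueled splitOn.go computes pvSplit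
lemma pv_go_eq : ∀ (fuel : Nat) (l cur : List Char) (acc : List (List Char)), l.length < fuel →
    PySem.Chars.splitOn.go ['.'] fuel l cur acc = acc.reverse ++ pvSplit cur.reverse l := by
  intro fuel
  induction fuel with
  | zero => intro l cur acc h; omega
  | succ f ih =>
    intro l cur acc h
    cases l with
    | nil => rw [PySem.Chars.splitOn.go.eq_def]; simp [pvSplit]
    | cons c rest =>
      rw [PySem.Chars.splitOn.go.eq_def]
      by_cases hc : c = '.'
      · subst hc
        have hpre : List.isPrefixOf ['.'] ('.' :: rest) = true := by
          simp [List.isPrefixOf]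
        have hr : rest.length < f := by simp at h; omega
        simp only [hpre, if_pos]
        rw [show List.drop (['.'] : List Char).length ('.' :: rest) = rest from rfl,
            ih _ _ _ hr]
        simp [pvSplit]
      · have hpre : List.isPrefixOf ['.'] (c :: rest) = false := by
          simp [List.isPrefixOf]
          exact fun h' => hc h'.symm
        have hr : rest.length < f := by simp at h; omega
        simp only [hpre, Bool.false_eq_true, if_false]
        rw [ih _ _ _ hr]
        rw [pvSplit_cons_ne _ c rest hc]
        simp

lemma pv_splitOn_eq (cs : List Char) : PySem.Chars.splitOn cs ['.'] = pvSplit [] cs := by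
  rw [PySem.Chars.splitOn, pv_go_eq (cs.length + 1) cs [] [] (by omega)]
  simp

-- pvBL is the prefix before the last dot
lemma pvBL_decomp (cs : List Char) (h : '.' ∈ cs) :
    ∃ suf, cs = pvBL cs ++ '.' :: suf ∧ '.' ∉ suf := by
  induction cs with
  | nil => simp at h
  | cons c r ih =>
    by_cases hr : '.' ∈ r
    · obtain ⟨suf, h1, h2⟩ := ih hr
      refine ⟨suf, ?_, h2⟩
      rw [pvBL]
      simp only [hr, if_pos, List.cons_append]
      rw [← h1]
    · have hc : c = '.' := by
        cases List.mem_cons.mp h with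
        | inl h1 => exact h1.symm
        | inr h1 => exact absurd h1 hr
      exact ⟨r, by simp [pvBL, hr, hc], hr⟩

-- singleton-prefix characterisation at a drop position
lemma pv_prefix_drop (cs : List Char) (k : Nat) :
    List.isPrefixOf ['.'] (cs.drop k) = true ↔ ∃ t, cs.drop k = '.' :: t := by
  cases hd : cs.drop k with
  | nil => simp [List.isPrefixOf]
  | cons a t =>
    constructor
    · intro hp
      simp [List.isPrefixOf] at hp
      exact ⟨t, by rw [← hp]⟩
    · intro ⟨t', ht⟩
      cases ht
      simp [List.isPrefixOf]

lemma pv_rfind_go (cs suf : List Char) (h2 : '.' ∉ suf)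
    (hcs : cs = pvBL cs ++ '.' :: suf) :
    ∀ j, (pvBL cs).length ≤ j → PySem.Chars.rfind.go cs ['.'] j = ((pvBL cs).length : Int) := by
  intro j
  induction j with
  | zero =>
    intro hj
    have hb : (pvBL cs).length = 0 := by omega
    have hb0 : pvBL cs = [] := List.eq_nil_of_length_eq_zero hb
    rw [PySem.Chars.rfind.go.eq_def]
    have hp : List.isPrefixOf ['.'] cs = true := by
      rw [hcs, hb0]
      simp [List.isPrefixOf]
    simp [hp, hb]
  | succ j ih =>
    intro hj
    rw [PySem.Chars.rfind.go.eq_def]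
    by_cases he : (pvBL cs).length = j + 1
    · have hp : List.isPrefixOf ['.'] (cs.drop (j + 1)) = true := by
        rw [pv_prefix_drop]
        refine ⟨suf, ?_⟩
        conv_lhs => rw [hcs]
        rw [← he, List.drop_append]
        simp
      simp [hp, he]
    · have hlt : (pvBL cs).length < j + 1 := by omega
      have hnp : ¬ (∃ t, cs.drop (j + 1) = '.' :: t) := by
        rintro ⟨t, ht⟩
        rw [hcs, List.drop_append] at ht
        have hd1 : List.drop (j + 1) (pvBL cs) = [] := by
          apply List.drop_eq_nil_of_le; omega
        rw [hd1, List.nil_append] at ht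
        obtain ⟨m, hm⟩ : ∃ m, j + 1 - (pvBL cs).length = m + 1 :=
          ⟨j - (pvBL cs).length, by omega⟩
        rw [hm] at ht
        simp only [List.drop_succ_cons] at ht
        exact h2 (List.mem_of_mem_drop (ht ▸ List.mem_cons_self))
      have hf : List.isPrefixOf ['.'] (cs.drop (j + 1)) ≠ true :=
        fun hx => hnp ((pv_prefix_drop cs (j + 1)).mp hx)
      simp only [Bool.not_eq_true] at hf
      simp only [hf, Bool.false_eq_true, if_false]
      exact ih (by omega)

-- A's loop computes the '.'-join of the parts before the last
lemma pvGoA_eq (n : List String) (h2 : 2 ≤ n.length) :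
    ∀ d i text, n.length - 2 - i = d → i ≤ n.length - 2 →
      pvGoA n i text = text ++ pvJoinS ((n.drop i).dropLast) := by
  intro d
  induction d with
  | zero =>
    intro i text hd hi
    have hlt : i < n.length := by omega
    rw [pvGoA, dif_pos hlt, if_pos (by omega)]
    have hlen : (n.drop (i + 1)).length = 1 := by simp; omega
    obtain ⟨b, hb⟩ := List.length_eq_one_iff.mp hlen
    rw [List.drop_eq_getElem_cons hlt, hb, List.getD_eq_getElem n "" hlt]
    simp [pvJoinS]
  | succ d ih =>
    intro i text hd hi
    have hlt : i < n.length := by omega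
    rw [pvGoA, dif_pos hlt, if_neg (by omega)]
    rw [ih (i + 1) _ (by omega) (by omega)]
    have hnn : (n.drop (i + 1)).dropLast ≠ [] := by
      intro hx
      have h3 : (n.drop (i + 1)).dropLast.length = (n.drop (i + 1)).length - 1 :=
        List.length_dropLast
      rw [hx] at h3
      simp at h3
      omega
    have htl : n.drop (i + 1) ≠ [] := by
      intro hx; rw [hx] at hnn; simp [List.dropLast] at hnn
    obtain ⟨y, ys, hys⟩ := List.exists_cons_of_ne_nil hnn
    rw [List.drop_eq_getElem_cons hlt, List.dropLast_cons_of_ne_nil htl, hys, pvJoinS,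
        List.getD_eq_getElem n "" hlt]
    simp [String.append_assoc]

-- join over mapped strings is the mapped join
lemma pvJoinS_map (L : List (List Char)) :
    pvJoinS (L.map String.ofList) = String.ofList (pvJoinD L) := by
  induction L with
  | nil => rfl
  | cons x xs ih =>
    cases xs with
    | nil => rfl
    | cons y ys =>
      simp only [List.map, pvJoinS, pvJoinD]
      rw [show String.ofList y :: List.map String.ofList ys = (y :: ys).map String.ofList from
        rfl, ih]
      apply String.toList_injective
      simp [show (".".toList) = ['.'] from rfl]

-- ===== VERDICT (by name: the statement is the Claim_ definition above) =====
theorem getFName_spec : Claim_equal_getFName := by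
  intro name _dom hpre
  unfold Spec_getFName getFName getFName_alt
  have hdot : '.' ∈ name.toList := by
    obtain ⟨s, t, hst⟩ := (PySem.Str.isIn_iff_infix "." name).mp hpre
    rw [← hst]
    simp [show (".".toList) = ['.'] from rfl]
  obtain ⟨suf, hcs, hsuf⟩ := pvBL_decomp name.toList hdot
  -- A side
  have hsplitq : PySem.Str.split? name "." =
      some ((pvSplit [] name.toList).map String.ofList) := by
    rw [PySem.Str.split?]
    simp [PySem.Chars.split?, show (".".toList) = ['.'] from rfl, pv_splitOn_eq]
  rw [hsplitq]
  have hlen2 := pvSplit_len2 [] name.toList hdot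
  have hlen2' : 2 ≤ ((pvSplit [] name.toList).map String.ofList).length := by
    simpa using hlen2
  rw [Option.getD_some,
      pvGoA_eq ((pvSplit [] name.toList).map String.ofList) hlen2' _ 0 "" rfl (by omega)]
  rw [List.drop_zero, ← List.map_dropLast, pvJoinS_map, pvM name.toList [] hdot,
      List.nil_append]
  -- B side
  have hblen : (pvBL name.toList).length ≤ name.toList.length := by
    conv_rhs => rw [hcs]
    simp
  have hrf : PySem.Str.rfind name "." = ((pvBL name.toList).length : Int) := by
    rw [PySem.Str.rfind, show (".".toList) = ['.'] from rfl, PySem.Chars.rfind]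
    exact pv_rfind_go name.toList suf hsuf hcs name.toList.length hblen
  rw [hrf]
  have hne : ((((pvBL name.toList).length : Int)) == (-1 : Int)) = false := by
    simp only [beq_eq_false_iff_ne, ne_eq]
    omega
  simp only [hne, Bool.false_eq_true, if_false]
  rw [PySem.Str.slice, PySem.Chars.slice_eq_listSlice,
      PySem.List.slice_to name.toList (by omega)]
  apply String.toList_injective
  simp only [String.toList_append, String.toList_ofList, Int.toNat_natCast,
    show ("".toList : List Char) = [] from rfl, List.nil_append]
  nth_rewrite 3 [hcs]
  exact (List.take_left).symm
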